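-- pv_equiv track=rewrite | github.com/cenkbircanoglu/fb-coding-challenge | level2/hops.py | getSecondsRequired
-- ===== SOURCE A (Python) =====
-- from typing import List
--
-- def getSecondsRequired(N: int, F: int, P: List[int]) -> int:
--     P.sort()
--     current_ind = 0
--     hops = 0
--     while current_ind != F - 1:
--         hop = P[current_ind + 1] - P[current_ind] - 1
--         hops += hop
--         current_ind += 1
--     hops += (N - P[-1]) + (F - 1)
--     return hops
-- ===== SOURCE B (Python) =====
-- def getSecondsRequired(N, F, P):
--     # Closed form: the hops between consecutive frogs telescope, so only the
--     # smallest, the F-th smallest and the largest position matter.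
--     # (Unlike A, this does not sort P in place.)
--     Q = sorted(P)
--     return N - Q[0] + Q[F - 1] - Q[-1]
-- ===== Notes on version B (the rewrite author's own statement) =====
-- stated objective: simpler
-- what changed: The per-gap hop loop telescopes, so B replaces A's index loop with a closed-form expression over three elements of the sorted list (smallest, F-th smallest, largest); B also does not mutate P in place.
import Mathlib
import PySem

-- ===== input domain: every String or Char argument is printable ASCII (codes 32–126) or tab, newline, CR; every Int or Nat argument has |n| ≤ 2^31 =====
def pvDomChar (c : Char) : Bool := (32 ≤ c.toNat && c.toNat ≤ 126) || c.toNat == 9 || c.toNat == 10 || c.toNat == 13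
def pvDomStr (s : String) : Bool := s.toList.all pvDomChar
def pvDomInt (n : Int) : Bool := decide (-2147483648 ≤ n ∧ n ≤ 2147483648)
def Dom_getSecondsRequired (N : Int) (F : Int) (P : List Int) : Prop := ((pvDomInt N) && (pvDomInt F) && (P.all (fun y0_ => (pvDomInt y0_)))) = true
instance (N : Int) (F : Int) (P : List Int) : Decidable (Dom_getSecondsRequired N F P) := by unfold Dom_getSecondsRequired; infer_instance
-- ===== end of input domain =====

-- B replaces A's per-gap hop loop with the telescoped closed form over the sorted
-- positions (objective: simpler).  A sorts P IN PLACE (caller-visible mutation);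
-- B does not — the equivalence proved here is about the return value only.

-- ===== PORT A =====
-- A's while loop runs current_ind = 0, 1, …, F-2 (it raises IndexError, outside
-- Pre_, when F < 1 or F > len(P)); on Pre_ it is the fold over range(0, F-1) below.
def getSecondsRequired (N : Int) (F : Int) (P : List Int) : Int :=
  ((PySem.List.pyRange 0 (F - 1) 1).foldl
    (fun h i => h + (PySem.List.pyGetD (PySem.List.sorted P (fun x => x) false) (i + 1) 0
                     - PySem.List.pyGetD (PySem.List.sorted P (fun x => x) false) i 0 - 1)) 0)
  + (N - PySem.List.pyGetD (PySem.List.sorted P (fun x => x) false) (-1) 0) + (F - 1)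

-- ===== PORT B =====
def getSecondsRequired_alt (N : Int) (F : Int) (P : List Int) : Int :=
  N - PySem.List.pyGetD (PySem.List.sorted P (fun x => x) false) 0 0
    + PySem.List.pyGetD (PySem.List.sorted P (fun x => x) false) (F - 1) 0
    - PySem.List.pyGetD (PySem.List.sorted P (fun x => x) false) (-1) 0

-- ===== PRECONDITION & SPEC =====
-- Exactly the inputs on which A returns normally: otherwise A's loop or P[-1]
-- raises IndexError.
def Pre_getSecondsRequired (N : Int) (F : Int) (P : List Int) : Prop :=
  P ≠ [] ∧ 1 ≤ F ∧ F ≤ P.length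
instance (N : Int) (F : Int) (P : List Int) : Decidable (Pre_getSecondsRequired N F P) := by
  unfold Pre_getSecondsRequired; infer_instance

def pvWitness_getSecondsRequired : Int × Int × List Int := (10, 2, [3, 1, 6])

def Spec_getSecondsRequired (N : Int) (F : Int) (P : List Int) (out : Int) : Prop := out = getSecondsRequired_alt N F P
instance (N : Int) (F : Int) (P : List Int) (out : Int) : Decidable (Spec_getSecondsRequired N F P out) := by unfold Spec_getSecondsRequired; infer_instance

-- ===== CLAIM (what is proved, stated in full; the proofs are below) =====
def Claim_equal_getSecondsRequired : Prop := ∀ (N : Int) (F : Int) (P : List Int), Dom_getSecondsRequired N F P → Pre_getSecondsRequired N F P → Spec_getSecondsRequired N F P (getSecondsRequired N F P)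

-- ===== LEMMAS AND PROOFS =====

-- Telescoping of A's loop: over range(0, k) the gap sum collapses to Q[k] - Q[0] - k.
theorem hops_telescope (Q : List Int) (k : Nat) (hk : k < Q.length) (c : Int) :
    (PySem.List.pyRange 0 (k : Int) 1).foldl
      (fun h i => h + (PySem.List.pyGetD Q (i + 1) 0 - PySem.List.pyGetD Q i 0 - 1)) c
      = c + Q[k] - Q[0]'(Nat.lt_of_le_of_lt (Nat.zero_le k) hk) - k := by
  induction k generalizing c with
  | zero => simp [PySem.List.pyRange_one_eq_nil]
  | succ k ih =>
    have hk' : k < Q.length := Nat.lt_of_succ_lt hk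
    rw [show ((k + 1 : Nat) : Int) = (k : Int) + 1 by push_cast; ring,
        PySem.List.pyRange_one_succ_right (by omega), List.foldl_append, ih hk']
    simp only [List.foldl_cons, List.foldl_nil]
    rw [PySem.List.pyGetD_eq_getElem Q (i := (k : Int) + 1) 0 (by omega) (by omega),
        PySem.List.pyGetD_eq_getElem Q (i := (k : Int)) 0 (by omega) (by omega)]
    have h1 : ((k : Int) + 1).toNat = k + 1 := by omega
    have h2 : ((k : Int)).toNat = k := by omega
    simp only [h1, h2]; ring

theorem getSecondsRequired_spec0 (N F : Int) (P : List Int)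
    (h : Pre_getSecondsRequired N F P) :
    getSecondsRequired N F P = getSecondsRequired_alt N F P := by
  obtain ⟨hne, hF1, hFlen⟩ := h
  unfold getSecondsRequired getSecondsRequired_alt
  set Q := PySem.List.sorted P (fun x => x) false with hQ
  have hlen : Q.length = P.length := PySem.List.length_sorted ..
  have hQne : Q ≠ [] := by
    intro h0; apply hne
    have := (PySem.List.sorted_eq_nil_iff (xs := P) (key := fun x => x) (rev := false)).mp (hQ ▸ h0)
    exact this
  have hk : (F - 1).toNat < Q.length := by omega
  have hcast : F - 1 = (((F - 1).toNat : Nat) : Int) := by omega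
  rw [hcast, hops_telescope Q (F - 1).toNat hk 0]
  rw [PySem.List.pyGetD_eq_getElem Q (i := ((F - 1).toNat : Int)) 0 (by omega) (by omega)]
  rw [PySem.List.pyGetD_neg_one Q 0 hQne, PySem.List.pyGetD_zero]
  have hgd : Q.getD 0 0 = Q[0]'(by omega) := List.getD_eq_getElem Q 0 (by omega)
  have ht : ((F - 1).toNat : Int).toNat = (F - 1).toNat := by omega
  simp only [hgd, ht]
  ring

-- ===== VERDICT (by name: the statement is the Claim_ definition above) =====
theorem getSecondsRequired_spec : Claim_equal_getSecondsRequired := by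
  intro N F P _ hpre
  exact getSecondsRequired_spec0 N F P hpre
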